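-- pv_equiv track=rewrite | github.com/pypi-data/pypi-mirror-96 | packages/cashiersync/cashiersync-3.0.4-py3-none-any.whl/cashiersync/ledger_output_parser.py | get_total_lines
-- ===== SOURCE A (Python) =====
-- def get_total_lines(output):
--     '''
--     Extract the total lines from the output,
--     unless there is only one account, in which case use the complete output
--     '''
--     result = []
--     next_line_is_total = False
--     total_line = None
--
--     # Special cases
--     # if len(output) == 0:
--     #     return 0
--
--     if len(output) == 1:
--         # No income is an array with an empty string ['']
--         if output[0] == '':
--             total_line = "0"
--         else:
--             # One-line results don't have totals
--             total_line = output[0]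
--         result.append(total_line)
--     else:
--         for i, item in enumerate(output):
--             # get total
--             if next_line_is_total:
--                 total_line = output[i]
--                 #self.logger.debug(f'total {total_line}')
--                 result.append(total_line)
--             else:
--                 if '------' in output[i]:
--                     next_line_is_total = True
--
--     if total_line is None:
--         raise ValueError(f'No total fetched in {output}')
--
--     return result
-- ===== SOURCE B (Python) =====
-- def get_total_lines(output):
--     '''Return the lines after the first '------' separator
--     (one-line output: the line itself, or '0' for the empty line).'''
--     if len(output) == 1:
--         return ['0' if output[0] == '' else output[0]]
--     tail = _tail_after_separator(output)
--     if not tail: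
--         raise ValueError(f'No total fetched in {output}')
--     return tail
--
--
-- def _tail_after_separator(lines):
--     while lines:
--         head, lines = lines[0], lines[1:]
--         if '------' in head:
--             return lines
--     return None
-- ===== Notes on version B (the rewrite author's own statement) =====
-- stated objective: simpler
-- what changed: Replaces A's enumerate loop with a flag, an accumulator list and a sentinel total_line by a scan to the first '------' line followed by returning the remaining suffix directly.
import Mathlib
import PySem

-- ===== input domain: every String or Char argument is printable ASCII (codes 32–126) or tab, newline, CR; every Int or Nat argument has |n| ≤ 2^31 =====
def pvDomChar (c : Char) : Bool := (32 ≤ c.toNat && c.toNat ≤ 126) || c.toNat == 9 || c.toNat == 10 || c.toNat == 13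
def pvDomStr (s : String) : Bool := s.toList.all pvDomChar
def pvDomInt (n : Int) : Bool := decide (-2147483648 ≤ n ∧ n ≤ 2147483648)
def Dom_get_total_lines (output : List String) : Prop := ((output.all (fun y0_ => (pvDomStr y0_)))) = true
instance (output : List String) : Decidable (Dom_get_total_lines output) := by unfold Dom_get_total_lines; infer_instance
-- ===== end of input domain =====

-- B replaces A's flag/accumulator loop by 'find the first ------ line, return the suffix after it' (simpler decomposition, same values).


-- ===== PORT A =====
-- A's for-loop over the lines with state (result, next_line_is_total, total_line)
def gtlLoopA (lines : List String) (result : List String) (flag : Bool)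
    (total : Option String) : List String × Bool × Option String :=
  match lines with
  | [] => (result, flag, total)
  | x :: rest =>
    if flag then gtlLoopA rest (result ++ [x]) flag (some x)
    else if PySem.Str.isIn "------" x then gtlLoopA rest result true total
    else gtlLoopA rest result flag total

def get_total_lines (output : List String) : List String :=
  if output.length = 1 then
    let total_line := if output.headD "" = "" then "0" else output.headD ""
    [total_line]
  else
    let st := gtlLoopA output [] false none
    match st.2.2 with
    | none => []        -- Python: raise ValueError (excluded by Pre_)
    | some _ => st.1

-- ===== PORT B =====
-- Source B's _tail_after_separator: scan to the first line containing '------', return what follows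
def gtlTail (lines : List String) : Option (List String) :=
  match lines with
  | [] => none
  | x :: rest => if PySem.Str.isIn "------" x then some rest else gtlTail rest

def get_total_lines_alt (output : List String) : List String :=
  if output.length = 1 then
    [if output.headD "" = "" then "0" else output.headD ""]
  else
    match gtlTail output with
    | none => []        -- Python: raise ValueError (excluded by Pre_)
    | some tail => if tail = [] then [] else tail   -- empty tail: raise ValueError (excluded by Pre_)

-- ===== PRECONDITION & SPEC =====
-- Pre_ excludes exactly the inputs where A raises ValueError: several lines but no
-- '------' line strictly before the last line (no total line follows the separator).
def Pre_get_total_lines (output : List String) : Prop :=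
  output.length = 1 ∨ output.dropLast.any (fun s => PySem.Str.isIn "------" s) = true
instance (output : List String) : Decidable (Pre_get_total_lines output) := by
  unfold Pre_get_total_lines; infer_instance

def pvWitness_get_total_lines : List String := ["Assets", "------", "$ 100"]

def Spec_get_total_lines (output : List String) (out : List String) : Prop := out = get_total_lines_alt output
instance (output : List String) (out : List String) : Decidable (Spec_get_total_lines output out) := by unfold Spec_get_total_lines; infer_instance

-- ===== CLAIM (what is proved, stated in full; the proofs are below) =====
def Claim_equal_get_total_lines : Prop := ∀ (output : List String), Dom_get_total_lines output → Pre_get_total_lines output → Spec_get_total_lines output (get_total_lines output)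

-- ===== LEMMAS AND PROOFS =====

-- once the flag is set, A appends every remaining line and total tracks the last one
theorem gtlLoopA_flag_true (lines : List String) (result : List String) (total : Option String) :
    gtlLoopA lines result true total =
      (result ++ lines, true, lines.foldl (fun _ x => some x) total) := by
  induction lines generalizing result total with
  | nil => simp [gtlLoopA]
  | cons x rest ih => simp [gtlLoopA, ih, List.append_assoc]

theorem gtlLoopA_eq_tail (lines : List String) (result : List String) :
    gtlLoopA lines result false none =
      match gtlTail lines with
      | none => (result, false, none)
      | some rest => (result ++ rest, true, rest.foldl (fun _ x => some x) none) := by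
  induction lines generalizing result with
  | nil => simp [gtlLoopA, gtlTail]
  | cons x rest ih =>
    by_cases h : PySem.Chars.isIn ['-','-','-','-','-','-'] x.toList = true
    · simp [gtlLoopA, gtlTail, PySem.Str.isIn, h, gtlLoopA_flag_true]
    · simp [gtlLoopA, gtlTail, PySem.Str.isIn, h, ih]

theorem foldl_some_eq (l : List String) (t : String) :
    l.foldl (fun _ x => some x) (some t) = some (l.getLastD t) := by
  induction l generalizing t with
  | nil => simp
  | cons x rest ih =>
    rw [List.foldl_cons, ih, List.getLastD_cons]

-- the precondition (a separator strictly before the last line) ↔ gtlTail yields a nonempty tail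
theorem gtlTail_of_any (lines : List String)
    (h : lines.dropLast.any (fun s => PySem.Str.isIn "------" s) = true) :
    ∃ rest, gtlTail lines = some rest ∧ rest ≠ [] := by
  induction lines with
  | nil => simp at h
  | cons x rest ih =>
    cases rest with
    | nil => simp at h
    | cons y ys =>
      by_cases hx : PySem.Chars.isIn ['-','-','-','-','-','-'] x.toList = true
      · exact ⟨y :: ys, by simp [gtlTail, PySem.Str.isIn, hx], by simp⟩
      · have h' : (y :: ys).dropLast.any (fun s => PySem.Str.isIn "------" s) = true := by
          simpa [List.dropLast, PySem.Str.isIn, hx] using h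
        obtain ⟨r, hr, hne⟩ := ih h'
        exact ⟨r, by simpa [gtlTail, PySem.Str.isIn, hx] using hr, hne⟩

-- ===== VERDICT (by name: the statement is the Claim_ definition above) =====
theorem get_total_lines_spec : Claim_equal_get_total_lines := by
  intro output _ hpre
  unfold Spec_get_total_lines
  by_cases h1 : output.length = 1
  · simp [get_total_lines, get_total_lines_alt, h1]
  · have hany : output.dropLast.any (fun s => PySem.Str.isIn "------" s) = true := by
      rcases hpre with h | h
      · exact absurd h h1
      · exact h
    obtain ⟨rest, hrest, hne⟩ := gtlTail_of_any output hany
    obtain ⟨t, ts, rfl⟩ : ∃ t ts, rest = t :: ts := by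
      cases rest with
      | nil => exact absurd rfl hne
      | cons t ts => exact ⟨t, ts, rfl⟩
    simp [get_total_lines, get_total_lines_alt, h1, gtlLoopA_eq_tail, hrest,
      List.foldl, foldl_some_eq]
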